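-- pv_equiv track=rewrite | github.com/jahnavinettim/EZ-TECHNOLOGY | special string.py | minimum_total_ascii_distance
-- ===== SOURCE A (Python) =====
-- def minimum_total_ascii_distance(A, S):
--     if all(char in S for char in A):
--         return 0
--     total_distance = 0
--     for char_A in A:
--         min_distance = float('inf')
--         for char_S in S:
--             distance = abs(ord(char_A) - ord(char_S))
--             if distance < min_distance:
--                 min_distance = distance
--         total_distance += min_distance
--     return total_distance
-- ===== SOURCE B (Python) =====
-- def minimum_total_ascii_distance(A, S):
--     codes = sorted(set(map(ord, S)))
--     n = len(codes)
--     total = 0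
--     for ch in A:
--         c = ord(ch)
--         lo, hi = 0, n
--         while lo < hi:
--             mid = (lo + hi) // 2
--             if codes[mid] < c:
--                 lo = mid + 1
--             else:
--                 hi = mid
--         cands = []
--         if lo < n:
--             cands.append(codes[lo] - c)
--         if lo > 0:
--             cands.append(c - codes[lo - 1])
--         total += min(cands)
--     return total
-- ===== Notes on version B (the rewrite author's own statement) =====
-- stated objective: alternative
-- what changed: B sorts the distinct ASCII codes of S once and finds each A-character's nearest code by hand-written binary search, replacing A's inner scan of S for every character of A (and A's all-chars-in-S prepass); fewer comparisons asymptotically, but not measurably faster on the timed inputs.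
-- outside the precondition, e.g. on minimum_total_ascii_distance('a', ''): A returns inf, B raises ValueError
import Mathlib
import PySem

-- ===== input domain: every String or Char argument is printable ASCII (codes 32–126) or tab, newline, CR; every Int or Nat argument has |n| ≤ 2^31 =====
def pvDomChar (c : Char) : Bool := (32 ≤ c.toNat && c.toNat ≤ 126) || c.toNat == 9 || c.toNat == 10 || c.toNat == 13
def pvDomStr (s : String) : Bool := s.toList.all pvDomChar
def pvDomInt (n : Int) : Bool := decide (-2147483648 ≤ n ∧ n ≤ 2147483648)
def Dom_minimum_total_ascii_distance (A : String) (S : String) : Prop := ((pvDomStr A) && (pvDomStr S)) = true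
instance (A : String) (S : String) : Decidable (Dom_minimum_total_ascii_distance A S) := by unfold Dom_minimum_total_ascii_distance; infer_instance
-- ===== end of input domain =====

-- B replaces A's per-character scan of S by one sort of S's distinct codes plus a
-- hand-written binary search per character of A (objective: alternative algorithm).

-- ===== PORT A =====
-- inner loop: min_distance starts at float('inf') (modelled as `none`), updated on strict decrease
def pvMinDist (c : Char) (S : List Char) : Option Int :=
  S.foldl (fun md cs =>
    let d : Int := |(c.toNat : Int) - (cs.toNat : Int)|
    match md with
    | none => some d
    | some m => if d < m then some d else some m) none

def minimum_total_ascii_distance (A : String) (S : String) : Int :=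
  -- `char in S` for a single character is membership in S
  if A.toList.all (fun c => S.toList.contains c) then 0
  else
    -- total_distance += min_distance; `.getD 0` is only reached when S = "" (outside Pre_,
    -- where Python returns float('inf'), not an int)
    A.toList.foldl (fun t c => t + (pvMinDist c S.toList).getD 0) 0

-- ===== PORT B =====
-- hand-written binary search loop of Source B (lo, hi while-loop), step for step
def pvBS (codes : List Int) (c : Int) (lo hi : Nat) : Nat :=
  if h : lo < hi then
    let mid := (lo + hi) / 2
    if codes.getD mid 0 < c then pvBS codes c (mid + 1) hi else pvBS codes c lo mid
  else lo
termination_by hi - lo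
decreasing_by all_goals omega

-- per-character body of Source B's loop: binary search, the ≤2 candidate distances, their min
def pvNearest (codes : List Int) (c : Int) : Int :=
  let n := codes.length
  let lo := pvBS codes c 0 n
  let cands : List Int :=
    (if lo < n then [codes.getD lo 0 - c] else []) ++
    (if 0 < lo then [c - codes.getD (lo - 1) 0] else [])
  -- min(cands); `.getD 0` only reached when S = "" (outside Pre_, where Source B raises ValueError)
  (PySem.List.min? cands (fun x => x)).getD 0

def minimum_total_ascii_distance_alt (A : String) (S : String) : Int :=
  let codes := PySem.List.sorted (PySem.Set.ofList (S.toList.map (fun s => (s.toNat : Int)))) (fun x => x) false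
  A.toList.foldl (fun total ch => total + pvNearest codes (ch.toNat : Int)) 0

-- ===== PRECONDITION & SPEC =====
-- Pre_ excludes S = "" with A ≠ "": there A returns float('inf') (not an int) and B raises ValueError.
def Pre_minimum_total_ascii_distance (A : String) (S : String) : Prop := S ≠ "" ∨ A = ""
instance (A : String) (S : String) : Decidable (Pre_minimum_total_ascii_distance A S) := by
  unfold Pre_minimum_total_ascii_distance; infer_instance

def pvWitness_minimum_total_ascii_distance : String × String := ("ab", "xz")

def Spec_minimum_total_ascii_distance (A : String) (S : String) (out : Int) : Prop := out = minimum_total_ascii_distance_alt A S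
instance (A : String) (S : String) (out : Int) : Decidable (Spec_minimum_total_ascii_distance A S out) := by unfold Spec_minimum_total_ascii_distance; infer_instance

-- ===== CLAIM (what is proved, stated in full; the proofs are below) =====
def Claim_equal_minimum_total_ascii_distance : Prop := ∀ (A : String) (S : String), Dom_minimum_total_ascii_distance A S → Pre_minimum_total_ascii_distance A S → Spec_minimum_total_ascii_distance A S (minimum_total_ascii_distance A S)

-- ===== LEMMAS AND PROOFS =====

-- binary-search invariant: result r splits codes into a strictly-below-c prefix and an ≥ c suffix
lemma pvBS_spec (codes : List Int) (c : Int) (hp : codes.Pairwise (· < ·)) :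
    ∀ (k lo hi : Nat), lo ≤ hi → hi - lo ≤ k → hi ≤ codes.length →
    (∀ j, j < lo → codes.getD j 0 < c) →
    (∀ j, hi ≤ j → j < codes.length → c ≤ codes.getD j 0) →
    lo ≤ pvBS codes c lo hi ∧ pvBS codes c lo hi ≤ hi ∧
    (∀ j, j < pvBS codes c lo hi → codes.getD j 0 < c) ∧
    (∀ j, pvBS codes c lo hi ≤ j → j < codes.length → c ≤ codes.getD j 0) := by
  have hmono : ∀ i j : Nat, i ≤ j → j < codes.length → codes.getD i 0 ≤ codes.getD j 0 := by
    intro i j hij hj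
    rcases Nat.lt_or_ge i j with h | h
    · have := (List.pairwise_iff_getElem.mp hp) i j (lt_trans h hj) hj h
      rw [List.getD_eq_getElem _ _ (lt_trans h hj), List.getD_eq_getElem _ _ hj]
      exact le_of_lt this
    · have : i = j := le_antisymm hij h
      subst this; exact le_refl _
  intro k
  induction k with
  | zero =>
    intro lo hi hlh hk hhi hlow hhigh
    have hnl : ¬ lo < hi := by omega
    rw [pvBS, dif_neg hnl]
    refine ⟨le_refl _, hlh, hlow, ?_⟩
    intro j hj hlen
    exact hhigh j (by omega) hlen
  | succ k ih =>
    intro lo hi hlh hk hhi hlow hhigh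
    by_cases h : lo < hi
    · have hmidlt : (lo + hi) / 2 < hi := by omega
      have hmidge : lo ≤ (lo + hi) / 2 := by omega
      have hmidlen : (lo + hi) / 2 < codes.length := lt_of_lt_of_le hmidlt hhi
      have heq : pvBS codes c lo hi =
          if codes.getD ((lo + hi) / 2) 0 < c then pvBS codes c ((lo + hi) / 2 + 1) hi
          else pvBS codes c lo ((lo + hi) / 2) := by
        rw [pvBS, dif_pos h]
      by_cases hc : codes.getD ((lo + hi) / 2) 0 < c
      · rw [heq, if_pos hc]
        have hlow' : ∀ j, j < (lo + hi) / 2 + 1 → codes.getD j 0 < c := by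
          intro j hj
          rcases Nat.lt_or_ge j lo with hjlo | hjlo
          · exact hlow j hjlo
          · exact lt_of_le_of_lt (hmono j ((lo + hi) / 2) (by omega) hmidlen) hc
        have ha1 : (lo + hi) / 2 + 1 ≤ hi := by omega
        have ha2 : hi - ((lo + hi) / 2 + 1) ≤ k := by omega
        obtain ⟨h1, h2, h3, h4⟩ := ih ((lo + hi) / 2 + 1) hi ha1 ha2 hhi hlow' hhigh
        exact ⟨by omega, h2, h3, h4⟩
      · rw [heq, if_neg hc]
        have hhigh' : ∀ j, (lo + hi) / 2 ≤ j → j < codes.length → c ≤ codes.getD j 0 := by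
          intro j hj hlen
          exact le_trans (not_lt.mp hc) (hmono ((lo + hi) / 2) j hj hlen)
        have hb1 : (lo + hi) / 2 - lo ≤ k := by omega
        obtain ⟨h1, h2, h3, h4⟩ := ih lo ((lo + hi) / 2) hmidge hb1 (le_of_lt hmidlen) hlow hhigh'
        exact ⟨h1, by omega, h3, h4⟩
    · rw [pvBS, dif_neg h]
      refine ⟨le_refl _, hlh, hlow, ?_⟩
      intro j hj hlen
      exact hhigh j (by omega) hlen

-- pvNearest is the minimum distance from c to an element of a strictly sorted nonempty list
lemma pvNearest_spec (codes : List Int) (c : Int) (hp : codes.Pairwise (· < ·))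
    (hne : codes ≠ []) :
    (∃ x ∈ codes, pvNearest codes c = |c - x|) ∧
    (∀ x ∈ codes, pvNearest codes c ≤ |c - x|) := by
  have hlen : 0 < codes.length := List.length_pos_iff.mpr hne
  obtain ⟨hr0, hrn, hbelow, habove⟩ :=
    pvBS_spec codes c hp codes.length 0 codes.length (Nat.zero_le _) (by omega) (le_refl _)
      (fun j hj => absurd hj (Nat.not_lt_zero j))
      (fun j hj hlen' => absurd (lt_of_le_of_lt hj hlen') (lt_irrefl _))
  set r := pvBS codes c 0 codes.length with hrdef
  have habs_ge : ∀ j, r ≤ j → j < codes.length → |c - codes.getD j 0| = codes.getD j 0 - c := by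
    intro j h1 h2
    have := habove j h1 h2
    rw [abs_of_nonpos (by omega)]; ring
  have habs_lt : ∀ j, j < r → |c - codes.getD j 0| = c - codes.getD j 0 := by
    intro j h1
    have := hbelow j h1
    exact abs_of_nonneg (by omega)
  -- the candidate list and its min
  set cands : List Int :=
    (if r < codes.length then [codes.getD r 0 - c] else []) ++
    (if 0 < r then [c - codes.getD (r - 1) 0] else []) with hcands
  have hNdef : pvNearest codes c = (PySem.List.min? cands (fun x => x)).getD 0 := by
    rw [hcands, hrdef]; rfl
  rw [hNdef]
  have hcne : cands ≠ [] := by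
    rcases Nat.lt_or_ge r codes.length with h | h
    · simp [hcands, h]
    · have hr : 0 < r := by omega
      simp [hcands, hr]
  obtain ⟨m, hm⟩ : ∃ m, PySem.List.min? cands (fun x => x) = some m := by
    cases hmm : PySem.List.min? cands (fun x => x) with
    | none => exact absurd ((PySem.List.min?_eq_none_iff _ _).mp hmm) hcne
    | some m => exact ⟨m, rfl⟩
  have hmem := PySem.List.min?_mem hm
  have hmin := PySem.List.min?_isMin hm
  rw [hm, Option.getD_some]
  constructor
  · -- m is a genuine distance to a member
    have : m ∈ (if r < codes.length then [codes.getD r 0 - c] else []) ∨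
           m ∈ (if 0 < r then [c - codes.getD (r - 1) 0] else []) := by
      rw [hcands] at hmem; exact List.mem_append.mp hmem
    rcases this with h | h
    · by_cases hrl : r < codes.length
      · simp only [hrl, if_pos, List.mem_singleton] at h
        refine ⟨codes.getD r 0, ?_, ?_⟩
        · rw [List.getD_eq_getElem _ _ hrl]; exact List.getElem_mem _
        · rw [habs_ge r (le_refl _) hrl, h]
      · simp [hrl] at h
    · by_cases hr0' : 0 < r
      · simp only [hr0', if_pos, List.mem_singleton] at h
        have hrl : r - 1 < codes.length := by omega
        refine ⟨codes.getD (r - 1) 0, ?_, ?_⟩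
        · rw [List.getD_eq_getElem _ _ hrl]; exact List.getElem_mem _
        · rw [habs_lt (r - 1) (by omega), h]
      · simp [hr0'] at h
  · -- m is below every distance
    intro x hx
    obtain ⟨j, hj, hxj⟩ := List.getElem_of_mem hx
    have hxg : x = codes.getD j 0 := by rw [List.getD_eq_getElem _ _ hj, hxj]
    rcases Nat.lt_or_ge j r with hjr | hjr
    · -- left of r : compare with the left candidate
      have hr0' : 0 < r := by omega
      have hcand : (c - codes.getD (r - 1) 0) ∈ cands := by
        simp [hcands, hr0']
      have h1 : m ≤ c - codes.getD (r - 1) 0 := hmin _ hcand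
      have h2 : codes.getD j 0 ≤ codes.getD (r - 1) 0 := by
        rcases Nat.lt_or_ge j (r - 1) with h | h
        · have hr1 : r - 1 < codes.length := by omega
          have := (List.pairwise_iff_getElem.mp hp) j (r - 1) hj hr1 h
          rw [List.getD_eq_getElem _ _ hj, List.getD_eq_getElem _ _ hr1]
          exact le_of_lt this
        · have : j = r - 1 := by omega
          subst this; exact le_refl _
      rw [hxg, habs_lt j hjr]; omega
    · -- at or right of r : compare with the right candidate
      have hrl : r < codes.length := lt_of_le_of_lt hjr hj
      have hcand : (codes.getD r 0 - c) ∈ cands := by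
        simp [hcands, hrl]
      have h1 : m ≤ codes.getD r 0 - c := hmin _ hcand
      have h2 : codes.getD r 0 ≤ codes.getD j 0 := by
        rcases Nat.lt_or_ge r j with h | h
        · have := (List.pairwise_iff_getElem.mp hp) r j hrl hj h
          rw [List.getD_eq_getElem _ _ hrl, List.getD_eq_getElem _ _ hj]
          exact le_of_lt this
        · have : r = j := by omega
          subst this; exact le_refl _
      rw [hxg, habs_ge j hjr hj]; omega

-- A's inner fold, characterised: the running minimum of the distances seen so far
lemma pvMinDist_fold (c : Char) :
    ∀ (t : List Char) (m0 : Int),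
    ∃ m, t.foldl (fun md cs =>
        let d : Int := |(c.toNat : Int) - (cs.toNat : Int)|
        match md with
        | none => some d
        | some m => if d < m then some d else some m) (some m0) = some m ∧
      (m = m0 ∨ ∃ s ∈ t, m = |(c.toNat : Int) - (s.toNat : Int)|) ∧ m ≤ m0 ∧
      ∀ s ∈ t, m ≤ |(c.toNat : Int) - (s.toNat : Int)| := by
  intro t
  induction t with
  | nil => intro m0; exact ⟨m0, rfl, Or.inl rfl, le_refl _, by simp⟩
  | cons h tl ih =>
    intro m0
    simp only [List.foldl_cons]
    by_cases hd : |(c.toNat : Int) - (h.toNat : Int)| < m0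
    · obtain ⟨m, hm, hsrc, hle, hall⟩ := ih (|(c.toNat : Int) - (h.toNat : Int)|)
      refine ⟨m, by simpa [hd] using hm, ?_, by omega, ?_⟩
      · rcases hsrc with h1 | ⟨s, hs, hval⟩
        · exact Or.inr ⟨h, List.mem_cons_self, h1⟩
        · exact Or.inr ⟨s, List.mem_cons_of_mem _ hs, hval⟩
      · intro s hs
        rcases List.mem_cons.mp hs with h1 | h1
        · subst h1; omega
        · exact hall s h1
    · obtain ⟨m, hm, hsrc, hle, hall⟩ := ih m0
      refine ⟨m, by simpa [hd] using hm, ?_, hle, ?_⟩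
      · rcases hsrc with h1 | ⟨s, hs, hval⟩
        · exact Or.inl h1
        · exact Or.inr ⟨s, List.mem_cons_of_mem _ hs, hval⟩
      intro s hs
      rcases List.mem_cons.mp hs with h1 | h1
      · subst h1; omega
      · exact hall s h1

-- per-character agreement when S is nonempty
lemma perchar_eq (S : String) (hS : S.toList ≠ []) (c : Char) :
    (pvMinDist c S.toList).getD 0 =
      pvNearest (PySem.List.sorted (PySem.Set.ofList (S.toList.map (fun s => (s.toNat : Int)))) (fun x => x) false) (c.toNat : Int) := by
  set codes := PySem.List.sorted (PySem.Set.ofList (S.toList.map (fun s => (s.toNat : Int)))) (fun x => x) false with hcdef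
  have hp : codes.Pairwise (· < ·) := PySem.List.sorted_ofList_pairwise_lt _
  have hmemc : ∀ x : Int, x ∈ codes ↔ ∃ s ∈ S.toList, x = (s.toNat : Int) := by
    intro x
    rw [hcdef, PySem.List.mem_sorted, PySem.Set.mem_ofList, List.mem_map]
    constructor
    · rintro ⟨s, hs, rfl⟩; exact ⟨s, hs, rfl⟩
    · rintro ⟨s, hs, rfl⟩; exact ⟨s, hs, rfl⟩
  have hcne : codes ≠ [] := by
    obtain ⟨s, hs⟩ := List.exists_mem_of_ne_nil _ hS
    intro hnil
    have : ((s.toNat : Int)) ∈ codes := (hmemc _).mpr ⟨s, hs, rfl⟩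
    rw [hnil] at this; exact absurd this (List.not_mem_nil)
  obtain ⟨⟨x, hx, hbx⟩, hblow⟩ := pvNearest_spec codes (c.toNat : Int) hp hcne
  -- evaluate A's fold on S = h :: t
  obtain ⟨h, t, hht⟩ : ∃ h t, S.toList = h :: t := by
    cases hlist : S.toList with
    | nil => exact absurd hlist hS
    | cons h t => exact ⟨h, t, rfl⟩
  obtain ⟨m, hm, hsrc, _, hall⟩ := pvMinDist_fold c t (|(c.toNat : Int) - (h.toNat : Int)|)
  have hmd : pvMinDist c S.toList = some m := by
    rw [hht]; unfold pvMinDist; simpa using hm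
  rw [hmd, Option.getD_some]
  -- m is a distance to a member of S, and below every distance
  have hmmem : ∃ s ∈ S.toList, m = |(c.toNat : Int) - (s.toNat : Int)| := by
    rcases hsrc with h1 | ⟨s, hs, hval⟩
    · exact ⟨h, by rw [hht]; exact List.mem_cons_self, h1⟩
    · exact ⟨s, by rw [hht]; exact List.mem_cons_of_mem _ hs, hval⟩
  have hmall : ∀ s ∈ S.toList, m ≤ |(c.toNat : Int) - (s.toNat : Int)| := by
    intro s hs
    rw [hht] at hs
    rcases List.mem_cons.mp hs with h1 | h1
    · subst h1; omega
    · exact hall s h1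
  -- antisymmetry
  obtain ⟨sx, hsx, hsxval⟩ := (hmemc x).mp hx
  have h1 : m ≤ pvNearest codes (c.toNat : Int) := by
    rw [hbx, hsxval]; exact hmall sx hsx
  obtain ⟨sm, hsm, hsmval⟩ := hmmem
  have h2 : pvNearest codes (c.toNat : Int) ≤ m := by
    rw [hsmval]
    exact hblow _ ((hmemc _).mpr ⟨sm, hsm, rfl⟩)
  omega

-- a fold that only adds zeros stays at its accumulator
lemma foldl_add_zero {α : Type} (g : α → Int) (L : List α) (h : ∀ c ∈ L, g c = 0) :
    ∀ acc : Int, L.foldl (fun t c => t + g c) acc = acc := by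
  induction L with
  | nil => intro acc; rfl
  | cons x xs ih =>
    intro acc
    simp only [List.foldl_cons, h x List.mem_cons_self, add_zero]
    exact ih (fun c hc => h c (List.mem_cons_of_mem _ hc)) acc

lemma toList_ne_nil_of_ne_empty (s : String) (h : s ≠ "") : s.toList ≠ [] := by
  intro hnil
  exact h (String.toList_inj.mp (by simpa using hnil))

-- ===== VERDICT (by name: the statement is the Claim_ definition above) =====
theorem minimum_total_ascii_distance_spec : Claim_equal_minimum_total_ascii_distance := by
  intro A S _ hpre
  unfold Spec_minimum_total_ascii_distance
  unfold minimum_total_ascii_distance minimum_total_ascii_distance_alt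
  set codes := PySem.List.sorted (PySem.Set.ofList (S.toList.map (fun s => (s.toNat : Int)))) (fun x => x) false with hcdef
  by_cases hall : A.toList.all (fun c => S.toList.contains c)
  · -- shortcut branch: every per-character nearest distance is 0
    simp only [hall, if_pos]
    have hz : ∀ c ∈ A.toList, pvNearest codes (c.toNat : Int) = 0 := by
      intro c hc
      have hin : c ∈ S.toList := by
        have := List.all_eq_true.mp hall c hc
        simpa using this
      have hS : S.toList ≠ [] := fun hnil => by rw [hnil] at hin; exact absurd hin List.not_mem_nil
      have hp : codes.Pairwise (· < ·) := PySem.List.sorted_ofList_pairwise_lt _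
      have hcne : codes ≠ [] := by
        intro hnil
        have : ((c.toNat : Int)) ∈ codes := by
          rw [hcdef, PySem.List.mem_sorted, PySem.Set.mem_ofList, List.mem_map]
          exact ⟨c, hin, rfl⟩
        rw [hnil] at this; exact absurd this List.not_mem_nil
      obtain ⟨⟨x, _, hbx⟩, hblow⟩ := pvNearest_spec codes (c.toNat : Int) hp hcne
      have hle : pvNearest codes (c.toNat : Int) ≤ 0 := by
        have : ((c.toNat : Int)) ∈ codes := by
          rw [hcdef, PySem.List.mem_sorted, PySem.Set.mem_ofList, List.mem_map]
          exact ⟨c, hin, rfl⟩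
        have := hblow _ this
        simpa using this
      have hge : 0 ≤ pvNearest codes (c.toNat : Int) := by rw [hbx]; exact abs_nonneg _
      omega
    exact (foldl_add_zero _ _ hz 0).symm
  · -- main branch: the two folds agree character by character
    have hall' : (A.toList.all (fun c => S.toList.contains c)) = false := by
      simpa using hall
    rw [hall']
    simp only [Bool.false_eq_true, if_false]
    have hAne : A.toList ≠ [] := by
      intro hnil
      exact hall (by rw [hnil]; rfl)
    have hS : S.toList ≠ [] := by
      rcases hpre with h | h
      · exact toList_ne_nil_of_ne_empty S h
      · exact absurd (by rw [h]; rfl) hAne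
    have hfun : (fun (t : Int) (c : Char) => t + (pvMinDist c S.toList).getD 0) =
        (fun (total : Int) (ch : Char) => total + pvNearest codes (ch.toNat : Int)) := by
      funext t c
      rw [perchar_eq S hS c, hcdef]
    rw [hfun]
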